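-- pv_equiv track=rewrite | github.com/jarvis-00001/Memory-Management-Visualizer | app.py | simulate_paging
-- ===== SOURCE A (Python) =====
-- from collections import deque, OrderedDict
--
-- def simulate_paging(page_references, num_frames, algorithm):
--     frames = []
--     page_faults = []
--
--     if algorithm == "FIFO":
--         queue = deque(maxlen=num_frames)
--         for page in page_references:
--             if page not in queue:
--                 page_faults.append(True)
--                 if len(queue) == num_frames:
--                     queue.popleft()  # Remove the oldest page
--                 queue.append(page)
--             else:
--                 page_faults.append(False)
--             frame_state = list(queue)
--             # Pad with None if not full
--             while len(frame_state) < num_frames: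
--                 frame_state.append(None)
--             frames.append(frame_state.copy())
--
--     elif algorithm == "LRU":
--         lru_dict = OrderedDict()
--         for page in page_references:
--             if page not in lru_dict:
--                 page_faults.append(True)
--                 if len(lru_dict) == num_frames:
--                     lru_dict.popitem(last=False)  # Remove least recently used
--                 lru_dict[page] = True
--             else:
--                 page_faults.append(False)
--                 # Move to the end (most recently used)
--                 lru_dict.move_to_end(page)
--             frame_state = list(lru_dict.keys())
--             # Pad with None if not full
--             while len(frame_state) < num_frames:
--                 frame_state.append(None)
--             frames.append(frame_state.copy())
--
--     elif algorithm == "Optimal":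
--         frame_state = [None] * num_frames
--         for i, page in enumerate(page_references):
--             if page not in frame_state:
--                 page_faults.append(True)
--                 if None in frame_state:
--                     # Fill empty slot
--                     frame_state[frame_state.index(None)] = page
--                 else:
--                     # Find the page that won't be used for the longest time
--                     future_indices = {}
--                     for j, p in enumerate(frame_state):
--                         try:
--                             next_use = page_references[i+1:].index(p)
--                             future_indices[j] = next_use
--                         except ValueError:
--                             # Page not used in the future
--                             future_indices[j] = float('inf')
--
--                     if future_indices:
--                         # Replace the page with the furthest next use
--                         to_replace = max(future_indices, key=future_indices.get)
--                         frame_state[to_replace] = page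
--             else:
--                 page_faults.append(False)
--
--             frames.append(frame_state.copy())
--
--     return frames, page_faults
-- ===== SOURCE B (Python) =====
-- def simulate_paging(page_references, num_frames, algorithm):
--     # Staged evaluation: compute the list of cache states first (a scan of a pure
--     # step function), then derive the padded frame snapshots and the fault flags
--     # from that state list in separate passes.  Optimal uses a precomputed
--     # next-use table instead of rescanning the future reference slice.
--     if algorithm in ("FIFO", "LRU"):
--         def step(order, page):
--             if page in order:
--                 if algorithm == "LRU":
--                     return [q for q in order if q != page] + [page]
--                 return order
--             base = order[1:] if order and len(order) == num_frames else order
--             return base + [page]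
--         states = []
--         cur = []
--         for p in page_references:
--             cur = step(cur, p)
--             states.append(cur)
--         frames = [st + [None] * (num_frames - len(st)) for st in states]
--         faults = [p not in prev for p, prev in zip(page_references, [[]] + states)]
--         return frames, faults
--     elif algorithm == "Optimal":
--         n = len(page_references)
--         rnxt = []
--         last = {}
--         for i, p in reversed(list(enumerate(page_references))):
--             rnxt.append(last.get(p, n))
--             last[p] = i
--         nxt = rnxt[::-1]
--
--         def step(slots, i, page):
--             t = nxt[i]
--             if any(s[0] == page for s in slots):
--                 return [(page, t) if s[0] == page else s for s in slots]
--             if len(slots) < num_frames: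
--                 return slots + [(page, t)]
--             if not slots:
--                 return slots
--             victim = 0
--             for j in range(1, len(slots)):
--                 if slots[victim][1] < slots[j][1]:
--                     victim = j
--             return slots[:victim] + [(page, t)] + slots[victim + 1:]
--         states = []
--         cur = []
--         for i, p in enumerate(page_references):
--             cur = step(cur, i, p)
--             states.append(cur)
--         frames = [[s[0] for s in st] + [None] * (num_frames - len(st)) for st in states]
--         faults = [p not in [s[0] for s in prev] for p, prev in zip(page_references, [[]] + states)]
--         return frames, faults
--     return [], []
-- ===== Notes on version B (the rewrite author's own statement) =====
-- stated objective: alternative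
-- what changed: B is staged: a pure step function is scanned over the references to get the list of cache states, and the frame snapshots and fault flags are derived from that state list in separate map/zip passes (A interleaves everything in one mutating loop); Optimal additionally replaces the per-fault rescans of the future reference slice by a next-use table precomputed in one backward pass, and FIFO/LRU share one ordered-list step instead of separate deque/OrderedDict loops.
import Mathlib
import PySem

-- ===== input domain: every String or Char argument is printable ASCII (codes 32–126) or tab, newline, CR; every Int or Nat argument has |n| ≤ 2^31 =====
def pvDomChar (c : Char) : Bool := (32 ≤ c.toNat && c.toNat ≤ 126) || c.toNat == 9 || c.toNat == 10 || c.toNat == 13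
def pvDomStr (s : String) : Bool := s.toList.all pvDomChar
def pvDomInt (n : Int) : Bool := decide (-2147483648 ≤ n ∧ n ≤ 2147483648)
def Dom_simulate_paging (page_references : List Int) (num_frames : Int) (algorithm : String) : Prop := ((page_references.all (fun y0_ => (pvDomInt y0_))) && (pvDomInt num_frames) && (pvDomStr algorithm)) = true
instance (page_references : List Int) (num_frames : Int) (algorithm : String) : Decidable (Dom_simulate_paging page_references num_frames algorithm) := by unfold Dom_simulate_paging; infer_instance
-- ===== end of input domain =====

-- B computes the list of cache states by a scan of a pure step function and derives the frame
-- snapshots and fault flags from it in separate passes; Optimal replaces the per-fault rescans of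
-- the future slice by a precomputed next-use table.

-- ===== PORT A =====
-- 'while len(frame_state) < num_frames: frame_state.append(None)'
def padA (nf : Int) (fs : List (Option Int)) : List (Option Int) :=
  if (fs.length : Int) < nf then padA nf (fs ++ [none]) else fs
  termination_by (nf - fs.length).toNat
  decreasing_by simp [List.length_append]; omega

def fifoStepA (nf : Int) (st : List Int × List (List (Option Int)) × List Bool) (page : Int) :
    List Int × List (List (Option Int)) × List Bool :=
  if page ∈ st.1 then
    (st.1, st.2.1 ++ [padA nf (st.1.map some)], st.2.2 ++ [false])
  else
    -- 'if len(queue) == num_frames: queue.popleft()' then 'queue.append(page)'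
    let q := (if (st.1.length : Int) = nf then st.1.tail else st.1) ++ [page]
    (q, st.2.1 ++ [padA nf (q.map some)], st.2.2 ++ [true])

def lruStepA (nf : Int) (st : PySem.Dict Int Bool × List (List (Option Int)) × List Bool) (page : Int) :
    PySem.Dict Int Bool × List (List (Option Int)) × List Bool :=
  let d := st.1
  if d.contains page then
    -- move_to_end: drop the entry and re-append it with its stored value
    let d' := (d.erase page).insert page ((d.get? page).getD true)
    (d', st.2.1 ++ [padA nf (d'.keys.map some)], st.2.2 ++ [false])
  else
    -- 'if len(lru_dict) == num_frames: lru_dict.popitem(last=False)'; the [] arm is unreachable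
    -- (Python raises KeyError on an empty dict there; Pre_ excludes those inputs)
    let d1 := if (d.size : Int) = nf then (match d.keys with | k :: _ => d.erase k | [] => d) else d
    let d' := d1.insert page true
    (d', st.2.1 ++ [padA nf (d'.keys.map some)], st.2.2 ++ [true])

-- Python's '>' on the dict values; 'none' encodes float('inf') (only compared, never computed with)
def gtOpt : Option Nat → Option Nat → Bool
  | none, none => false
  | none, some _ => true
  | some _, none => false
  | some a, some b => decide (b < a)

-- max(future_indices, key=future_indices.get): first key attaining the maximal value
def argmaxA (l : List (Int × Option Nat)) : Int :=
  match l with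
  | [] => 0   -- unreachable: A only takes max of a nonempty dict
  | p :: rest => (rest.foldl (fun best kv => if gtOpt kv.2 best.2 then kv else best) p).1

def optStepA (refs : List Int) (nf : Int) (st : List (Option Int) × List (List (Option Int)) × List Bool)
    (ip : Int × Int) : List (Option Int) × List (List (Option Int)) × List Bool :=
  let fs := st.1
  if some ip.2 ∈ fs then
    (fs, st.2.1 ++ [fs], st.2.2 ++ [false])
  else
    let fs' :=
      if none ∈ fs then
        -- frame_state[frame_state.index(None)] = page  (index always found here)
        match PySem.List.index? fs none with
        | some j => PySem.List.pySetD fs (j : Int) (some ip.2)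
        | none => fs
      else
        -- future_indices[j] = page_references[i+1:].index(p), ValueError -> inf (= none)
        let future : List (Int × Option Nat) :=
          (PySem.List.enumerate fs 0).map (fun jp =>
            (jp.1, match jp.2 with
                   | some x => PySem.List.index? (PySem.List.slice refs (some (ip.1 + 1)) none) x
                   | none => none))
        if future.isEmpty then fs
        else PySem.List.pySetD fs (argmaxA future) (some ip.2)
    (fs', st.2.1 ++ [fs'], st.2.2 ++ [true])

def simulate_paging (page_references : List Int) (num_frames : Int) (algorithm : String) :
    List (List (Option Int)) × List Bool :=
  if algorithm = "FIFO" then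
    let r := page_references.foldl (fifoStepA num_frames) ([], [], [])
    (r.2.1, r.2.2)
  else if algorithm = "LRU" then
    let r := page_references.foldl (lruStepA num_frames) (PySem.Dict.empty, [], [])
    (r.2.1, r.2.2)
  else if algorithm = "Optimal" then
    let r := (PySem.List.enumerate page_references 0).foldl
      (optStepA page_references num_frames) (PySem.List.pyRepeat [none] num_frames, [], [])
    (r.2.1, r.2.2)
  else ([], [])

-- ===== PORT B =====
-- st + [None] * (num_frames - len(st))
def padB (nf : Int) (l : List (Option Int)) : List (Option Int) :=
  l ++ PySem.List.pyRepeat [none] (nf - l.length)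

-- the pure FIFO/LRU step on the ordered list of cached pages
def ordStep (nf : Int) (algorithm : String) (ord : List Int) (page : Int) : List Int :=
  if page ∈ ord then
    if algorithm = "LRU" then ord.filter (fun q => q ≠ page) ++ [page] else ord
  else
    (if ord ≠ [] ∧ (ord.length : Int) = nf then ord.tail else ord) ++ [page]

-- 'states = []; cur = []; for p in refs: cur = step(cur, p); states.append(cur)'
def scanOrd (nf : Int) (algorithm : String) (cur : List Int) : List Int → List (List Int)
  | [] => []
  | p :: rest =>
      let cur' := ordStep nf algorithm cur p
      cur' :: scanOrd nf algorithm cur' rest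

-- backward pass: rnxt.append(last.get(p, n)); last[p] = i, over reversed(list(enumerate(refs)))
def rnxtStep (n : Int) (st : List Int × PySem.Dict Int Int) (ip : Int × Int) :
    List Int × PySem.Dict Int Int :=
  (st.1 ++ [st.2.getD ip.2 n], st.2.insert ip.2 ip.1)

def buildNxt (refs : List Int) : List Int :=
  -- nxt = rnxt[::-1]  ([::-1] is List.reverse, cf. PySem.List.slice?_none_none_neg_one)
  (((PySem.List.enumerate refs 0).reverse).foldl (rnxtStep (refs.length : Int)) ([], PySem.Dict.empty)).1.reverse

-- 'victim = 0; for j in range(1, len(slots)): if slots[victim][1] < slots[j][1]: victim = j'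
def victimScan (slots : List (Int × Int)) : Int :=
  (PySem.List.pyRange 1 slots.length 1).foldl
    (fun v j => if (PySem.List.pyGetD slots v (0, 0)).2 < (PySem.List.pyGetD slots j (0, 0)).2 then j else v) 0

-- the pure Optimal step on the (page, next-use) slots
def optStepB (nxt : List Int) (nf : Int) (slots : List (Int × Int)) (ip : Int × Int) :
    List (Int × Int) :=
  let t := PySem.List.pyGetD nxt ip.1 0
  if ip.2 ∈ slots.map Prod.fst then
    slots.map (fun s => if s.1 = ip.2 then (ip.2, t) else s)
  else if (slots.length : Int) < nf then slots ++ [(ip.2, t)]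
  else if slots.isEmpty then slots
  else PySem.List.pySetD slots (victimScan slots) (ip.2, t)

def scanOpt (nxt : List Int) (nf : Int) (cur : List (Int × Int)) :
    List (Int × Int) → List (List (Int × Int))
  | [] => []
  | ip :: rest =>
      let cur' := optStepB nxt nf cur ip
      cur' :: scanOpt nxt nf cur' rest

def simulate_paging_alt (page_references : List Int) (num_frames : Int) (algorithm : String) :
    List (List (Option Int)) × List Bool :=
  if algorithm = "FIFO" ∨ algorithm = "LRU" then
    let states := scanOrd num_frames algorithm [] page_references
    (states.map (fun st => padB num_frames (st.map some)),
     List.zipWith (fun p prev => decide (p ∉ prev)) page_references ([] :: states))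
  else if algorithm = "Optimal" then
    let states := scanOpt (buildNxt page_references) num_frames []
      (PySem.List.enumerate page_references 0)
    (states.map (fun st => padB num_frames (st.map (fun s => some s.1))),
     List.zipWith (fun p prev => decide (p ∉ prev.map Prod.fst)) page_references ([] :: states))
  else ([], [])

-- ===== PRECONDITION & SPEC =====
-- Pre_ excludes exactly the inputs where A raises: "FIFO" with num_frames < 0 (deque(maxlen<0) is a
-- ValueError), and "FIFO"/"LRU" with num_frames = 0 and a nonempty reference list (popleft/popitem
-- on an empty container raise IndexError/KeyError).
def Pre_simulate_paging (page_references : List Int) (num_frames : Int) (algorithm : String) : Prop :=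
  (algorithm = "FIFO" → 1 ≤ num_frames ∨ (num_frames = 0 ∧ page_references = [])) ∧
  (algorithm = "LRU" → num_frames ≠ 0 ∨ page_references = [])
instance (page_references : List Int) (num_frames : Int) (algorithm : String) : Decidable (Pre_simulate_paging page_references num_frames algorithm) := by unfold Pre_simulate_paging; infer_instance

def pvWitness_simulate_paging : List Int × Int × String := ([1, 2, 3, 1, 4, 2], 2, "Optimal")

def Spec_simulate_paging (page_references : List Int) (num_frames : Int) (algorithm : String) (out : List (List (Option Int)) × List Bool) : Prop := out = simulate_paging_alt page_references num_frames algorithm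
instance (page_references : List Int) (num_frames : Int) (algorithm : String) (out : List (List (Option Int)) × List Bool) : Decidable (Spec_simulate_paging page_references num_frames algorithm out) := by unfold Spec_simulate_paging; infer_instance

-- ===== CLAIM (what is proved, stated in full; the proofs are below) =====
def Claim_equal_simulate_paging : Prop := ∀ (page_references : List Int) (num_frames : Int) (algorithm : String), Dom_simulate_paging page_references num_frames algorithm → Pre_simulate_paging page_references num_frames algorithm → Spec_simulate_paging page_references num_frames algorithm (simulate_paging page_references num_frames algorithm)

-- ===== LEMMAS AND PROOFS =====

-- the two paddings agree
lemma padA_eq (nf : Int) (l : List (Option Int)) :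
    padA nf l = l ++ List.replicate (nf - l.length).toNat none := by
  fun_induction padA nf l with
  | case1 l h ih =>
      rw [ih, List.append_assoc]
      congr 1
      have hlt : (l.length : Int) < nf := h
      have h2 : (nf - l.length).toNat = (nf - (l ++ [none]).length).toNat + 1 := by
        simp only [List.length_append, List.length_cons, List.length_nil]
        omega
      rw [h2, List.replicate_succ]
      rfl
  | case2 l h =>
      have : (nf - l.length).toNat = 0 := by omega
      simp [this]

lemma padB_eq (nf : Int) (l : List (Option Int)) :
    padB nf l = l ++ List.replicate (nf - l.length).toNat none := by
  simp [padB, PySem.List.pyRepeat]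

lemma padA_eq_padB (nf : Int) (l : List (Option Int)) : padA nf l = padB nf l := by
  rw [padA_eq, padB_eq]

-- FIFO: the deque loop produces exactly the scanned states, padded, plus the membership faults
lemma fifo_fold_eq (nf : Int) (hnf : nf ≠ 0) (refs : List Int) (ord : List Int)
    (fr : List (List (Option Int))) (fl : List Bool) :
    (refs.foldl (fifoStepA nf) (ord, fr, fl)).2
      = (fr ++ (scanOrd nf "FIFO" ord refs).map (fun st => padB nf (st.map some)),
         fl ++ List.zipWith (fun p prev => decide (p ∉ prev)) refs
           (ord :: scanOrd nf "FIFO" ord refs)) := by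
  induction refs generalizing ord fr fl with
  | nil => simp [scanOrd]
  | cons page rest ih =>
      have hord : ordStep nf "FIFO" ord page
          = if page ∈ ord then ord
            else (if (ord.length : Int) = nf then ord.tail else ord) ++ [page] := by
        unfold ordStep
        by_cases hm : page ∈ ord
        · simp [hm]
        · have hgd : (ord ≠ [] ∧ (ord.length : Int) = nf) ↔ ((ord.length : Int) = nf) := by
            constructor
            · rintro ⟨_, h⟩; exact h
            · intro h
              refine ⟨?_, h⟩
              rintro rfl
              simp at h
              omega
          simp only [if_neg hm, hgd]
      simp only [List.foldl_cons, scanOrd, List.map_cons, List.zipWith_cons_cons]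
      by_cases hm : page ∈ ord
      · have hA : fifoStepA nf (ord, fr, fl) page
            = (ord, fr ++ [padA nf (ord.map some)], fl ++ [false]) := by
          unfold fifoStepA; simp [hm]
        rw [hA, ih, hord]
        simp [hm, padA_eq_padB]
      · have hA : fifoStepA nf (ord, fr, fl) page
            = ((if (ord.length : Int) = nf then ord.tail else ord) ++ [page],
               fr ++ [padA nf (((if (ord.length : Int) = nf then ord.tail else ord) ++ [page]).map some)],
               fl ++ [true]) := by
          unfold fifoStepA; simp [hm]
        rw [hA, ih, hord]
        simp [hm, padA_eq_padB]

-- the list the LRU state holds after one access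
def ordLRU (nf : Int) (ord : List Int) (page : Int) : List Int :=
  if page ∈ ord then ord.erase page ++ [page]
  else (if ord ≠ [] ∧ (ord.length : Int) = nf then ord.tail else ord) ++ [page]

lemma ordStep_lru_eq (nf : Int) (ord : List Int) (page : Int) (hnd : ord.Nodup) :
    ordStep nf "LRU" ord page = ordLRU nf ord page := by
  unfold ordStep ordLRU
  by_cases hm : page ∈ ord
  · rw [if_pos hm, if_pos hm, if_pos rfl, List.Nodup.erase_eq_filter hnd]
    congr 2
    funext x
    by_cases hx : x = page <;> simp [hx]
  · simp [hm]

lemma ordLRU_nodup (nf : Int) (ord : List Int) (page : Int) (hnd : ord.Nodup) :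
    (ordLRU nf ord page).Nodup := by
  unfold ordLRU
  by_cases hm : page ∈ ord
  · simp only [if_pos hm]
    have h1 : (ord.erase page).Nodup := hnd.erase page
    have h2 : page ∉ ord.erase page := fun h => (List.Nodup.mem_erase_iff hnd).1 h |>.1 rfl
    refine List.Nodup.append h1 (by simp) ?_
    intro a ha hb
    simp at hb; subst hb; exact h2 ha
  · simp only [if_neg hm]
    by_cases hg : ord ≠ [] ∧ (ord.length : Int) = nf
    · simp only [if_pos hg]
      have h1 : ord.tail.Nodup := hnd.tail
      have h2 : page ∉ ord.tail := fun h => hm (List.mem_of_mem_tail h)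
      refine List.Nodup.append h1 (by simp) ?_
      intro a ha hb
      simp at hb; subst hb; exact h2 ha
    · simp only [if_neg hg]
      refine List.Nodup.append hnd (by simp) ?_
      intro a ha hb
      simp at hb; subst hb; exact hm ha

lemma getD_mk_true (l : List Int) (page : Int) :
    (((PySem.Dict.mk (l.map (fun p => (p, true)))).get? page).getD true) = true := by
  induction l with
  | nil => rfl
  | cons x xs ih =>
      by_cases hx : x = page
      · subst hx; simp [PySem.Dict.get?_mk_cons]
      · rw [List.map_cons, PySem.Dict.get?_mk_cons]
        simp only [beq_iff_eq, if_neg hx]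
        exact ih

lemma keys_mk_map (l : List Int) : (PySem.Dict.mk (l.map (fun p => (p, true)))).keys = l := by
  simp [PySem.Dict.keys, Function.comp_def]

lemma contains_mk_map (l : List Int) (page : Int) :
    (PySem.Dict.mk (l.map (fun p => (p, true)))).contains page = decide (page ∈ l) := by
  simp only [PySem.Dict.contains, List.any_map, Function.comp_def]
  induction l with
  | nil => simp
  | cons x xs ih =>
      by_cases hx : x = page
      · simp [hx]
      · have hx' : ¬ (page = x) := fun h => hx h.symm
        simp [hx, hx', ih]

lemma erase_mk_map (l : List Int) (page : Int) (hnd : l.Nodup) :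
    (PySem.Dict.mk (l.map (fun p => (p, true)))).erase page
      = PySem.Dict.mk ((l.erase page).map (fun p => (p, true))) := by
  simp only [PySem.Dict.erase, List.filter_map]
  congr 1
  rw [List.Nodup.erase_eq_filter hnd]
  congr 1

lemma insert_mk_map_fresh (l : List Int) (page : Int) (v : Bool) (hm : page ∉ l) :
    (PySem.Dict.mk (l.map (fun p => (p, true)))).insert page v
      = PySem.Dict.mk ((l.map (fun p => (p, true))) ++ [(page, v)]) := by
  unfold PySem.Dict.insert
  rw [if_neg]
  rw [contains_mk_map]
  simp [hm]

lemma stepA_lru_eq (nf : Int) (hnf : nf ≠ 0) (ord : List Int) (hnd : ord.Nodup)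
    (fr : List (List (Option Int))) (fl : List Bool) (page : Int) :
    lruStepA nf (PySem.Dict.mk (ord.map (fun p => (p, true))), fr, fl) page
      = (PySem.Dict.mk ((ordLRU nf ord page).map (fun p => (p, true))),
         fr ++ [padA nf ((ordLRU nf ord page).map some)],
         fl ++ [if page ∈ ord then false else true]) := by
  have hfun : ∀ (l : List Int), (l.map (fun p => (p, true)) ++ [(page, true)])
      = (l ++ [page]).map (fun p => (p, true)) := by intro l; simp
  unfold lruStepA ordLRU
  by_cases hm : page ∈ ord
  · have hc : (PySem.Dict.mk (ord.map (fun p => (p, true)))).contains page = true := by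
      rw [contains_mk_map]; simpa
    have hpe : page ∉ ord.erase page := fun h => ((List.Nodup.mem_erase_iff hnd).1 h).1 rfl
    simp only [hc, if_true, if_pos hm, getD_mk_true]
    rw [erase_mk_map ord page hnd, insert_mk_map_fresh _ _ _ hpe, hfun, keys_mk_map]
  · have hc : (PySem.Dict.mk (ord.map (fun p => (p, true)))).contains page = false := by
      rw [contains_mk_map]; simpa
    have hsz : ((PySem.Dict.mk (ord.map (fun p => (p, true)))).size : Int) = (ord.length : Int) := by
      simp [PySem.Dict.size]
    simp only [hc, Bool.false_eq_true, if_false, if_neg hm, hsz, keys_mk_map]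
    by_cases hg : (ord.length : Int) = nf
    · have hne : ord ≠ [] := by
        rintro rfl; simp at hg; omega
      obtain ⟨o, rest, rfl⟩ : ∃ o rest, ord = o :: rest := by
        cases ord with
        | nil => exact absurd rfl hne
        | cons o rest => exact ⟨o, rest, rfl⟩
      have hg' : (o :: rest) ≠ [] ∧ ((o :: rest).length : Int) = nf := ⟨by simp, hg⟩
      simp only [if_pos hg, if_pos hg']
      rw [erase_mk_map _ o hnd, List.erase_cons_head,
        insert_mk_map_fresh _ _ _ (fun h => hm (List.mem_cons_of_mem o h)), hfun, keys_mk_map]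
      simp
    · have hg' : ¬ (ord ≠ [] ∧ (ord.length : Int) = nf) := fun h => hg h.2
      simp only [if_neg hg, if_neg hg']
      rw [insert_mk_map_fresh _ _ _ hm, hfun, keys_mk_map]

-- LRU: the OrderedDict loop produces exactly the scanned states, padded, plus the faults
lemma lru_fold_eq (nf : Int) (hnf : nf ≠ 0) (refs : List Int) (ord : List Int)
    (hnd : ord.Nodup) (fr : List (List (Option Int))) (fl : List Bool) :
    (refs.foldl (lruStepA nf) (PySem.Dict.mk (ord.map (fun p => (p, true))), fr, fl)).2
      = (fr ++ (scanOrd nf "LRU" ord refs).map (fun st => padB nf (st.map some)),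
         fl ++ List.zipWith (fun p prev => decide (p ∉ prev)) refs
           (ord :: scanOrd nf "LRU" ord refs)) := by
  induction refs generalizing ord fr fl with
  | nil => simp [scanOrd]
  | cons page rest ih =>
      simp only [List.foldl_cons, scanOrd, List.map_cons, List.zipWith_cons_cons]
      rw [stepA_lru_eq nf hnf ord hnd fr fl page, ordStep_lru_eq nf ord page hnd,
        ih (ordLRU nf ord page) (ordLRU_nodup nf ord page hnd)]
      by_cases hm : page ∈ ord <;> simp [hm, padA_eq_padB]

-- next use of p at or after position k (refs.length if none)
def nextOcc (refs : List Int) (k : Nat) (p : Int) : Nat := k + (refs.drop k).findIdx (· == p)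

lemma findIdx_beq_eq_length {l : List Int} {p : Int} (h : p ∉ l) :
    l.findIdx (· == p) = l.length := by
  induction l with
  | nil => rfl
  | cons a t ih =>
      have ha : (a == p) = false := beq_eq_false_iff_ne.mpr (fun h' => h (h' ▸ List.mem_cons_self))
      simp [List.findIdx_cons, ha, ih (fun hx => h (List.mem_cons_of_mem a hx))]

lemma nextOcc_of_drop_cons {refs : List Int} {k : Nat} {s : Int} {rest : List Int}
    (h : refs.drop k = s :: rest) :
    nextOcc refs k s = k ∧ ∀ p : Int, p ≠ s → nextOcc refs k p = nextOcc refs (k + 1) p := by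
  have hdrop : refs.drop (k + 1) = rest := by
    have := congrArg (List.drop 1) h
    simpa [List.drop_drop] using this
  constructor
  · unfold nextOcc; rw [h]; simp [List.findIdx_cons]
  · intro p hp
    unfold nextOcc
    rw [h, hdrop, List.findIdx_cons]
    have hsp : (s == p) = false := beq_eq_false_iff_ne.mpr (fun h' => hp h'.symm)
    simp [hsp]; omega

lemma nextOcc_not_mem {refs : List Int} {k : Nat} {p : Int} (h : p ∉ refs.drop k) :
    nextOcc refs k p = k + (refs.drop k).length := by
  unfold nextOcc
  rw [findIdx_beq_eq_length h]

lemma nextOcc_lt_of_mem {refs : List Int} {k : Nat} {p : Int} (h : p ∈ refs.drop k) :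
    nextOcc refs k p < refs.length := by
  have hlt := List.findIdx_lt_length_of_exists (p := (· == p)) ⟨p, h, by simp⟩
  have hl := List.length_drop (l := refs) (i := k)
  have hk : (refs.drop k).length ≠ 0 := fun h0 => by
    rw [List.length_eq_zero_iff.mp h0] at h; simp at h
  unfold nextOcc; omega

lemma index?_drop (refs : List Int) (k : Nat) (p : Int) :
    PySem.List.index? (refs.drop k) p
      = if nextOcc refs k p < refs.length then some (nextOcc refs k p - k) else none := by
  by_cases hm : p ∈ refs.drop k
  · rw [if_pos (nextOcc_lt_of_mem hm)]
    unfold PySem.List.index? nextOcc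
    simp only [Nat.add_sub_cancel_left]
    generalize hl : refs.drop k = l at hm ⊢
    clear hl
    induction l with
    | nil => simp at hm
    | cons a t ih =>
        by_cases hap : a = p
        · subst hap; simp [List.idxOf?, List.findIdx?_cons, List.findIdx_cons]
        · have ha : (a == p) = false := beq_eq_false_iff_ne.mpr hap
          rcases List.mem_cons.mp hm with h' | h'
          · exact absurd h'.symm hap
          · simp [List.idxOf?, List.findIdx?_cons, List.findIdx_cons, ha] at ih ⊢
            rw [ih h']
  · rw [if_neg, (PySem.List.index?_eq_none_iff _ _).mpr hm]
    rw [nextOcc_not_mem hm]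
    have hl := List.length_drop (l := refs) (i := k)
    omega

lemma rnxt_fold (refs : List Int) (suf pre : List Int) (h : refs = pre ++ suf) :
    ((PySem.List.enumerate suf (pre.length : Int)).reverse.foldl
        (rnxtStep (refs.length : Int)) ([], PySem.Dict.empty)).1
      = ((List.range' pre.length suf.length).map
          (fun i => ((nextOcc refs (i + 1) (refs.getD i 0) : Nat) : Int))).reverse
    ∧ ∀ (p d : Int),
        ((PySem.List.enumerate suf (pre.length : Int)).reverse.foldl
            (rnxtStep (refs.length : Int)) ([], PySem.Dict.empty)).2.getD p d
          = if p ∈ suf then ((nextOcc refs pre.length p : Nat) : Int) else d := by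
  induction suf generalizing pre with
  | nil =>
      refine ⟨rfl, ?_⟩
      intro p d
      simp [PySem.List.enumerate, PySem.Dict.getD_empty]
  | cons s rest ih =>
      have hdropk : refs.drop pre.length = s :: rest := by rw [h]; exact List.drop_left
      have hself := (nextOcc_of_drop_cons hdropk).1
      have hstep := (nextOcc_of_drop_cons hdropk).2
      have hgd : refs.getD pre.length 0 = s := by
        rw [List.getD_eq_getElem?_getD, h, List.getElem?_append_right (le_refl _)]
        simp
      have hrefs' : refs = (pre ++ [s]) ++ rest := by rw [h]; simp
      have ihh := ih (pre ++ [s]) hrefs'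
      simp only [List.length_append, List.length_cons, List.length_nil, Nat.cast_add,
        Nat.cast_one, Nat.add_zero, Nat.cast_ofNat, zero_add] at ihh
      have hcons : PySem.List.enumerate (s :: rest) (pre.length : Int)
          = ((pre.length : Int), s) :: PySem.List.enumerate rest ((pre.length : Int) + 1) := rfl
      rw [hcons, List.reverse_cons, List.foldl_append]
      set X := (PySem.List.enumerate rest ((pre.length : Int) + 1)).reverse.foldl
        (rnxtStep (refs.length : Int)) ([], PySem.Dict.empty) with hX
      constructor
      · show X.1 ++ [X.2.getD s (refs.length : Int)] = _
        have hv : X.2.getD s (refs.length : Int)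
            = ((nextOcc refs (pre.length + 1) s : Nat) : Int) := by
          rw [ihh.2 s (refs.length : Int)]
          by_cases hsr : s ∈ rest
          · rw [if_pos hsr]
          · rw [if_neg hsr]
            have hd1 : refs.drop (pre.length + 1) = rest := by
              have := congrArg (List.drop 1) hdropk
              simpa [List.drop_drop] using this
            rw [nextOcc_not_mem (by rw [hd1]; exact hsr), hd1]
            rw [h]
            push_cast [List.length_append, List.length_cons]
            ring
        rw [ihh.1, hv]
        simp only [List.length_cons]
        rw [List.range'_succ, List.map_cons, List.reverse_cons, hgd]
      · intro p d
        show (X.2.insert s (pre.length : Int)).getD p d = _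
        rw [PySem.Dict.getD_insert]
        by_cases hps : p = s
        · subst hps
          rw [if_pos rfl, if_pos (List.mem_cons_self), hself]
        · rw [if_neg hps, ihh.2 p d]
          have : (p ∈ s :: rest) ↔ (p ∈ rest) := by simp [hps]
          by_cases hpr : p ∈ rest
          · rw [if_pos hpr, if_pos (this.mpr hpr), hstep p hps]
          · rw [if_neg hpr, if_neg (fun hc => hpr (this.mp hc))]

lemma buildNxt_spec (refs : List Int) :
    buildNxt refs = (List.range refs.length).map
      (fun i => ((nextOcc refs (i + 1) (refs.getD i 0) : Nat) : Int)) := by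
  have := (rnxt_fold refs refs [] (by simp)).1
  simp only [List.length_nil, Nat.cast_zero] at this
  unfold buildNxt
  rw [this, List.reverse_reverse, List.range_eq_range']

lemma padB_disp (nf : Int) (slots : List (Int × Int)) (hlen : slots.length ≤ nf.toNat) :
    padB nf (slots.map (fun q => (some q.1 : Option Int)))
      = slots.map (fun q => (some q.1 : Option Int))
        ++ List.replicate (nf.toNat - slots.length) none := by
  rw [padB_eq]
  congr 2
  simp only [List.length_map]
  omega

lemma argmaxA_cons (p : Int × Option Nat) (l : List (Int × Option Nat)) :
    argmaxA (p :: l)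
      = (l.foldl (fun best kv => if gtOpt kv.2 best.2 then kv else best) p).1 := rfl

lemma disp_hit (slots : List (Int × Int)) (page t : Int) :
    (slots.map (fun q => if q.1 = page then (page, t) else q)).map (fun q => (some q.1 : Option Int))
      = slots.map (fun q => (some q.1 : Option Int)) := by
  rw [List.map_map]
  apply List.map_congr_left
  intro q _
  by_cases hq : q.1 = page <;> simp [hq]

lemma map_fst_hit (slots : List (Int × Int)) (page t : Int) :
    (slots.map (fun q => if q.1 = page then (page, t) else q)).map Prod.fst
      = slots.map Prod.fst := by
  rw [List.map_map]
  apply List.map_congr_left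
  intro q _
  by_cases hq : q.1 = page <;> simp [hq]

lemma nodup_set {α : Type} [DecidableEq α] {l : List α} {j : Nat} {v : α}
    (hnd : l.Nodup) (hv : v ∉ l) : (l.set j v).Nodup := by
  induction l generalizing j with
  | nil => simp
  | cons a r ih =>
      cases j with
      | zero =>
          rw [List.set_cons_zero]
          exact List.nodup_cons.mpr ⟨fun hc => hv (List.mem_cons_of_mem _ hc),
            (List.nodup_cons.mp hnd).2⟩
      | succ j =>
          rw [List.set_cons_succ]
          refine List.nodup_cons.mpr ⟨?_, ih (List.nodup_cons.mp hnd).2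
            (fun hc => hv (List.mem_cons_of_mem _ hc))⟩
          intro hc
          rcases List.mem_or_eq_of_mem_set hc with h0 | h0
          · exact (List.nodup_cons.mp hnd).1 h0
          · exact hv (h0 ▸ List.mem_cons_self)

lemma index?_none_append (l : List Int) (t : List (Option Int)) :
    PySem.List.index? (l.map some ++ t) none
      = (PySem.List.index? t none).map (· + l.length) := by
  induction l with
  | nil =>
      simp only [List.map_nil, List.nil_append, List.length_nil]
      cases PySem.List.index? t none <;> rfl
  | cons a r ih =>
      simp only [List.map_cons, List.cons_append, List.length_cons]
      rw [PySem.List.index?_cons_of_ne _ (by simp), ih, Option.map_map]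
      cases PySem.List.index? t none with
      | none => rfl
      | some x => simp [Function.comp]

lemma gtOpt_enc (n k a b : Nat) (ha1 : k ≤ a) (ha2 : a ≤ n) (hb1 : k ≤ b) (hb2 : b ≤ n) :
    gtOpt (if a < n then some (a - k) else none) (if b < n then some (b - k) else none)
      = decide ((b : Int) < (a : Int)) := by
  split_ifs with h1 h2 h2 <;> simp only [gtOpt] <;> rw [eq_comm, Bool.eq_iff_iff] <;>
    simp <;> omega

lemma fold_choice_in {P : Int → Prop} (c : Int → Int → Prop) [inst : ∀ w j, Decidable (c w j)]
    (js : List Int) (v : Int) (hv : P v) (hjs : ∀ j ∈ js, P j) :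
    P (js.foldl (fun w j => if c w j then j else w) v) := by
  induction js generalizing v with
  | nil => exact hv
  | cons j js ih =>
      simp only [List.foldl_cons]
      by_cases h0 : c v j
      · rw [if_pos h0]; exact ih _ (hjs j (by simp)) (fun x hx => hjs x (by simp [hx]))
      · rw [if_neg h0]; exact ih _ hv (fun x hx => hjs x (by simp [hx]))

lemma fold_argmax_sim (slots : List (Int × Int)) (g : Int → Option Nat)
    (hg : ∀ v j : Int, 0 ≤ v → v < (slots.length : Int) → 0 ≤ j → j < (slots.length : Int) →
      gtOpt (g j) (g v)
        = decide ((PySem.List.pyGetD slots v (0, 0)).2 < (PySem.List.pyGetD slots j (0, 0)).2))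
    (js : List Int) (hjs : ∀ j ∈ js, 0 ≤ j ∧ j < (slots.length : Int))
    (v : Int) (hv : 0 ≤ v ∧ v < (slots.length : Int)) :
    (js.map (fun j => (j, g j))).foldl (fun best kv => if gtOpt kv.2 best.2 then kv else best) (v, g v)
      = ((js.foldl (fun w j =>
            if (PySem.List.pyGetD slots w (0, 0)).2 < (PySem.List.pyGetD slots j (0, 0)).2 then j else w) v),
         g (js.foldl (fun w j =>
            if (PySem.List.pyGetD slots w (0, 0)).2 < (PySem.List.pyGetD slots j (0, 0)).2 then j else w) v)) := by
  induction js generalizing v with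
  | nil => rfl
  | cons j js ih =>
      obtain ⟨hj0, hjl⟩ := hjs j (by simp)
      simp only [List.map_cons, List.foldl_cons]
      rw [hg v j hv.1 hv.2 hj0 hjl]
      by_cases hc : (PySem.List.pyGetD slots v (0, 0)).2 < (PySem.List.pyGetD slots j (0, 0)).2
      · simp only [hc, decide_true, if_pos trivial, if_pos hc]
        exact ih (fun x hx => hjs x (by simp [hx])) j ⟨hj0, hjl⟩
      · simp only [hc, decide_false, if_neg hc]
        rw [if_neg (by simp)]
        exact ih (fun x hx => hjs x (by simp [hx])) v hv

lemma nextOcc_ge (refs : List Int) (k : Nat) (p : Int) : k ≤ nextOcc refs k p :=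
  Nat.le_add_right _ _

lemma nextOcc_le {refs : List Int} {k : Nat} (hk : k ≤ refs.length) (p : Int) :
    nextOcc refs k p ≤ refs.length := by
  have h1 : (refs.drop k).findIdx (· == p) ≤ (refs.drop k).length := List.findIdx_le_length
  have h2 := List.length_drop (l := refs) (i := k)
  unfold nextOcc; omega

-- Optimal: the rescanning loop produces exactly the scanned slot states, displayed, plus the faults
lemma opt_fold_eq (refs : List Int) (nf : Int) (pre suf : List Int) (h : refs = pre ++ suf)
    (fs : List (Option Int)) (slots : List (Int × Int))
    (fr : List (List (Option Int))) (fl : List Bool)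
    (hfs : fs = slots.map (fun s => some s.1) ++ List.replicate (nf.toNat - slots.length) none)
    (hlen : slots.length ≤ nf.toNat)
    (hnd : (slots.map Prod.fst).Nodup)
    (hnext : ∀ j (hj : j < slots.length),
      slots[j].2 = ((nextOcc refs pre.length slots[j].1 : Nat) : Int)) :
    ((PySem.List.enumerate suf (pre.length : Int)).foldl (optStepA refs nf) (fs, fr, fl)).2
      = (fr ++ (scanOpt (buildNxt refs) nf slots (PySem.List.enumerate suf (pre.length : Int))).map
            (fun st => padB nf (st.map (fun s => some s.1))),
         fl ++ List.zipWith (fun p prev => decide (p ∉ prev.map Prod.fst)) suf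
            (slots :: scanOpt (buildNxt refs) nf slots (PySem.List.enumerate suf (pre.length : Int)))) := by
  induction suf generalizing pre fs slots fr fl with
  | nil => simp [PySem.List.enumerate, scanOpt]
  | cons s rest ih =>
      have hk : pre.length < refs.length := by
        rw [h, List.length_append, List.length_cons]; omega
      have hdropk : refs.drop pre.length = s :: rest := by rw [h]; exact List.drop_left
      have hgd : refs.getD pre.length 0 = s := by
        rw [List.getD_eq_getElem?_getD, h, List.getElem?_append_right (le_refl _)]
        simp
      have hstepOcc := (nextOcc_of_drop_cons hdropk).2
      have hrefs' : refs = (pre ++ [s]) ++ rest := by rw [h]; simp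
      have hlen1 : (pre ++ [s]).length = pre.length + 1 := by simp
      have hT : PySem.List.pyGetD (buildNxt refs) ((pre.length : Nat) : Int) 0
          = ((nextOcc refs (pre.length + 1) s : Nat) : Int) := by
        rw [PySem.List.pyGetD_natCast, buildNxt_spec, PySem.List.getD_map_range _ _ _ _ hk, hgd]
      have hcons : PySem.List.enumerate (s :: rest) (pre.length : Int)
          = ((pre.length : Int), s) :: PySem.List.enumerate rest ((pre.length : Int) + 1) := rfl
      have hcast : ((pre.length : Int) + 1) = (((pre ++ [s]).length : Nat) : Int) := by
        push_cast [List.length_append, List.length_cons, List.length_nil]; ring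
      have hmem : (some s ∈ fs) ↔ s ∈ slots.map Prod.fst := by
        rw [hfs]
        simp [List.mem_append, List.mem_replicate, List.mem_map]
      rw [hcons]
      simp only [List.foldl_cons, scanOpt, List.map_cons, List.zipWith_cons_cons]
      by_cases hm : s ∈ slots.map Prod.fst
      · -- hit: A leaves the frame untouched; B refreshes the slot's next-use field
        set T := ((nextOcc refs (pre.length + 1) s : Nat) : Int) with hTdef
        set slots' := slots.map (fun q => if q.1 = s then (s, T) else q) with hS'
        have hA : optStepA refs nf (fs, fr, fl) ((pre.length : Int), s)
            = (fs, fr ++ [fs], fl ++ [false]) := by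
          unfold optStepA
          simp only [if_pos (hmem.mpr hm)]
        have hB : optStepB (buildNxt refs) nf slots ((pre.length : Int), s) = slots' := by
          unfold optStepB
          simp only [hT, ← hTdef, if_pos hm, ← hS']
        have hpad : padB nf (slots'.map (fun q => some q.1)) = fs := by
          rw [hS', disp_hit slots s T, padB_disp nf slots hlen, ← hfs]
        rw [hA, hB]
        have hrec := ih (pre ++ [s]) hrefs' fs slots' (fr ++ [fs]) (fl ++ [false]) ?_ ?_ ?_ ?_
        · rw [hcast] at *
          rw [hrec, hpad]
          simp [hm]
        · rw [hfs, hS', disp_hit slots s T]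
          simp only [List.length_map]
        · simpa only [hS', List.length_map] using hlen
        · rw [hS', map_fst_hit]; exact hnd
        · intro j hj
          have hj2 : j < slots.length := by simpa only [hS', List.length_map] using hj
          rw [hlen1]
          simp only [hS', List.getElem_map]
          by_cases hqs : (slots[j]'hj2).1 = s
          · simp only [if_pos hqs]
            exact hTdef
          · simp only [if_neg hqs]
            rw [hnext j hj2, hstepOcc _ hqs]
      · -- miss
        have hmf : some s ∉ fs := fun hc => hm (hmem.mp hc)
        set T := ((nextOcc refs (pre.length + 1) s : Nat) : Int) with hTdef
        by_cases hfill : slots.length < nf.toNat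
        · -- fill the first free slot
          have hnone : (none : Option Int) ∈ fs := by
            rw [hfs]
            exact List.mem_append_right _ (List.mem_replicate.mpr ⟨by omega, rfl⟩)
          obtain ⟨K', hK'⟩ : ∃ K', nf.toNat - slots.length = K' + 1 := ⟨nf.toNat - slots.length - 1, by omega⟩
          have hmapmap : slots.map (fun q => (some q.1 : Option Int))
              = (slots.map Prod.fst).map some := by rw [List.map_map]; rfl
          have hidx : PySem.List.index? fs none = some slots.length := by
            rw [hfs, hmapmap, index?_none_append, hK', List.replicate_succ,
              PySem.List.index?_cons_self]
            simp
          have hset : fs.set slots.length (some s)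
              = (slots ++ [(s, T)]).map (fun q => (some q.1 : Option Int))
                ++ List.replicate (nf.toNat - (slots.length + 1)) none := by
            rw [hfs, hK', List.replicate_succ, List.set_append]
            rw [if_neg (by simp only [List.length_map]; omega)]
            simp only [List.length_map, Nat.sub_self, List.set_cons_zero, List.map_append,
              List.map_cons, List.map_nil]
            rw [List.append_assoc]
            simp only [List.cons_append, List.nil_append]
            rw [show nf.toNat - (slots.length + 1) = K' from by omega]
          have hA : optStepA refs nf (fs, fr, fl) ((pre.length : Int), s)
              = (fs.set slots.length (some s), fr ++ [fs.set slots.length (some s)], fl ++ [true]) := by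
            unfold optStepA
            simp only [if_neg hmf, if_pos hnone, hidx, PySem.List.pySetD_natCast]
          have hB : optStepB (buildNxt refs) nf slots ((pre.length : Int), s)
              = slots ++ [(s, T)] := by
            unfold optStepB
            simp only [hT, ← hTdef, if_neg hm]
            have hslt : ((slots.length : Int) < nf) := by omega
            rw [if_pos hslt]
          have hpad : padB nf ((slots ++ [(s, T)]).map (fun q => some q.1))
              = fs.set slots.length (some s) := by
            have hl1 : (slots ++ [(s, T)]).length ≤ nf.toNat := by
              simp only [List.length_append, List.length_cons, List.length_nil]
              omega
            rw [padB_disp nf (slots ++ [(s, T)]) hl1, hset]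
            simp
          rw [hA, hB]
          have hrec := ih (pre ++ [s]) hrefs' (fs.set slots.length (some s)) (slots ++ [(s, T)])
            (fr ++ [fs.set slots.length (some s)]) (fl ++ [true]) ?_ ?_ ?_ ?_
          · rw [hcast] at *
            rw [hrec, hpad]
            simp [hm]
          · rw [hset]; simp
          · simp only [List.length_append, List.length_cons, List.length_nil]; omega
          · simp only [List.map_append, List.map_cons, List.map_nil]
            refine List.Nodup.append hnd (by simp) ?_
            intro a ha hb
            simp only [List.mem_cons, List.not_mem_nil, or_false] at hb
            subst hb; exact hm ha
          · intro j hj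
            rw [hlen1]
            have hjlen : j < slots.length + 1 := by
              simpa using hj
            by_cases hjs : j < slots.length
            · rw [List.getElem_append_left hjs]
              have hq : (slots[j]'hjs).1 ≠ s :=
                fun hc => hm (hc ▸ List.mem_map_of_mem (List.getElem_mem hjs))
              rw [hnext j hjs, hstepOcc _ hq]
            · have hje : j = slots.length := by omega
              subst hje
              rw [List.getElem_append_right (le_refl _)]
              simp
              exact hTdef
        · -- eviction: the frame table is full
          have hKzero : nf.toNat - slots.length = 0 := by omega
          have hfs0 : fs = slots.map (fun q => (some q.1 : Option Int)) := by
            rw [hfs, hKzero]; simp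
          have hnone : (none : Option Int) ∉ fs := by
            rw [hfs0]; simp
          have hBc : ¬ ((slots.length : Int) < nf) := by omega
          cases slots with
          | nil =>
              have hfsnil : fs = [] := by rw [hfs0]; rfl
              have hA : optStepA refs nf (fs, fr, fl) ((pre.length : Int), s)
                  = (fs, fr ++ [fs], fl ++ [true]) := by
                unfold optStepA
                simp only [if_neg hmf, if_neg hnone, hfsnil]
                rfl
              have hB : optStepB (buildNxt refs) nf ([] : List (Int × Int)) ((pre.length : Int), s)
                  = [] := by
                unfold optStepB
                simp only [if_neg hm]
                rw [if_neg hBc]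
                rfl
              have hpadnil : padB nf ([] : List (Option Int)) = [] := by
                have h0 : nf.toNat = 0 := by simpa using hKzero
                simp [padB, PySem.List.pyRepeat_singleton, h0]
              rw [hA, hB]
              have hrec := ih (pre ++ [s]) hrefs' fs [] (fr ++ [fs]) (fl ++ [true])
                (by rw [hfsnil]; simp [show nf.toNat = 0 from by simpa using hKzero])
                (by simp) (by simp) (by intro j hj; simp at hj)
              rw [hcast] at *
              rw [hrec, hfsnil]
              simp [hm, hpadnil]
          | cons q qs =>
              have hLpos : (0 : Int) < ((q :: qs).length : Int) := by
                simp only [List.length_cons]; positivity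
              have hslice : PySem.List.slice refs (some ((pre.length : Int) + 1)) none
                  = refs.drop (pre.length + 1) := by
                rw [show ((pre.length : Int) + 1) = (((pre.length + 1 : Nat)) : Int) by push_cast; ring]
                exact PySem.List.slice_from_natCast _ _
              set g : Int → Option Nat := fun j =>
                if nextOcc refs (pre.length + 1)
                    ((PySem.List.pyGetD (q :: qs) j ((0 : Int), (0 : Int))).1) < refs.length
                then some (nextOcc refs (pre.length + 1)
                    ((PySem.List.pyGetD (q :: qs) j ((0 : Int), (0 : Int))).1) - (pre.length + 1))
                else none with hgdef
              have hfl' : fs.length = (q :: qs).length := by rw [hfs0]; simp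
              have hfut : ((PySem.List.enumerate fs 0).map (fun jp =>
                    (jp.1, match jp.2 with
                           | some x => PySem.List.index?
                               (PySem.List.slice refs (some ((pre.length : Int) + 1)) none) x
                           | none => none)))
                  = (PySem.List.pyRange 0 (((q :: qs).length : Nat) : Int)).map (fun j => (j, g j)) := by
                rw [PySem.List.enumerate_eq_map_pyRange fs none, List.map_map]
                rw [show PySem.List.len fs = (((q :: qs).length : Nat) : Int) by
                  rw [PySem.List.len_eq, hfl']]
                apply List.map_congr_left
                intro j hj
                obtain ⟨hj0, hjL⟩ := PySem.List.mem_pyRange_one.mp hj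
                have hgetfs : PySem.List.pyGetD fs j none
                    = some ((PySem.List.pyGetD (q :: qs) j ((0 : Int), (0 : Int))).1) := by
                  rw [PySem.List.pyGetD_eq_getElem fs none hj0 (by rw [hfl']; exact hjL),
                      PySem.List.pyGetD_eq_getElem (q :: qs) _ hj0 hjL]
                  simp only [hfs0, List.getElem_map]
                simp only [Function.comp_def, hgetfs]
                rw [hslice, index?_drop refs (pre.length + 1) _, hgdef]
              have hkey : ∀ v : Int, 0 ≤ v → v < ((q :: qs).length : Int) →
                  (PySem.List.pyGetD (q :: qs) v ((0 : Int), (0 : Int))).2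
                    = ((nextOcc refs (pre.length + 1)
                        ((PySem.List.pyGetD (q :: qs) v ((0 : Int), (0 : Int))).1) : Nat) : Int) := by
                intro v hv0 hvL
                have hvn : v.toNat < (q :: qs).length := by
                  have := hvL; omega
                rw [PySem.List.pyGetD_eq_getElem _ _ hv0 hvL]
                have hqv : ((q :: qs)[v.toNat]'hvn).1 ≠ s :=
                  fun hc => hm (hc ▸ List.mem_map_of_mem (List.getElem_mem hvn))
                rw [hnext v.toNat hvn, hstepOcc _ hqv]
              have hg2 : ∀ v j : Int, 0 ≤ v → v < ((q :: qs).length : Int) →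
                  0 ≤ j → j < ((q :: qs).length : Int) →
                  gtOpt (g j) (g v)
                    = decide ((PySem.List.pyGetD (q :: qs) v ((0 : Int), (0 : Int))).2
                        < (PySem.List.pyGetD (q :: qs) j ((0 : Int), (0 : Int))).2) := by
                intro v j hv0 hvL hj0 hjL
                rw [hkey v hv0 hvL, hkey j hj0 hjL, hgdef]
                exact gtOpt_enc refs.length (pre.length + 1) _ _
                  (nextOcc_ge refs _ _) (nextOcc_le (by omega) _)
                  (nextOcc_ge refs _ _) (nextOcc_le (by omega) _)
              set w := ((PySem.List.pyRange 1 (((q :: qs).length : Nat) : Int)).foldl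
                (fun v j => if (PySem.List.pyGetD (q :: qs) v ((0 : Int), (0 : Int))).2
                    < (PySem.List.pyGetD (q :: qs) j ((0 : Int), (0 : Int))).2 then j else v) 0) with hwdef
              have hwin : 0 ≤ w ∧ w < ((q :: qs).length : Int) := by
                rw [hwdef]
                refine fold_choice_in (P := fun x => 0 ≤ x ∧ x < ((q :: qs).length : Int)) _ _ _
                  ⟨le_refl 0, hLpos⟩ ?_
                intro j hj
                have := PySem.List.mem_pyRange_one.mp hj
                exact ⟨by omega, this.2⟩
              have hvic : victimScan (q :: qs) = w := by
                unfold victimScan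
                exact hwdef.symm
              have hargmax : argmaxA ((PySem.List.pyRange 0 (((q :: qs).length : Nat) : Int)).map
                  (fun j => (j, g j))) = w := by
                rw [PySem.List.pyRange_one_cons hLpos, List.map_cons, argmaxA_cons]
                simp only [zero_add]
                rw [fold_argmax_sim (q :: qs) g hg2
                  (PySem.List.pyRange 1 (((q :: qs).length : Nat) : Int)) (fun j hj => by
                      have := PySem.List.mem_pyRange_one.mp hj
                      exact ⟨by omega, this.2⟩) 0 ⟨le_refl 0, hLpos⟩]
              have hne : ((PySem.List.pyRange 0 (((q :: qs).length : Nat) : Int)).map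
                  (fun j => (j, g j))).isEmpty = false := by
                rw [PySem.List.pyRange_one_cons hLpos, List.map_cons]
                rfl
              have hA : optStepA refs nf (fs, fr, fl) ((pre.length : Int), s)
                  = (fs.set w.toNat (some s), fr ++ [fs.set w.toNat (some s)], fl ++ [true]) := by
                unfold optStepA
                simp only [if_neg hmf, if_neg hnone, hfut, hne, Bool.false_eq_true, if_false,
                  hargmax, PySem.List.pySetD_of_nonneg _ _ hwin.1]
              have hB : optStepB (buildNxt refs) nf (q :: qs) ((pre.length : Int), s)
                  = (q :: qs).set w.toNat (s, T) := by
                unfold optStepB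
                simp only [hT, ← hTdef, if_neg hm, if_neg hBc, List.isEmpty_cons,
                  Bool.false_eq_true, if_false, hvic, PySem.List.pySetD_of_nonneg _ _ hwin.1]
              have hdisp' : ((q :: qs).set w.toNat (s, T)).map (fun r => (some r.1 : Option Int))
                  = fs.set w.toNat (some s) := by
                rw [List.map_set, hfs0]
              have hpad' : padB nf (((q :: qs).set w.toNat (s, T)).map (fun r => some r.1))
                  = fs.set w.toNat (some s) := by
                rw [padB_disp nf ((q :: qs).set w.toNat (s, T)) (by rw [List.length_set]; omega)]
                rw [List.length_set, hKzero]
                simp only [List.replicate_zero, List.append_nil]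
                exact hdisp'
              rw [hA, hB]
              have hrec := ih (pre ++ [s]) hrefs' (fs.set w.toNat (some s))
                ((q :: qs).set w.toNat (s, T)) (fr ++ [fs.set w.toNat (some s)]) (fl ++ [true])
                ?_ ?_ ?_ ?_
              · rw [hcast] at *
                rw [hrec, hpad']
                have hflag : decide (s ∉ List.map Prod.fst (q :: qs)) = true := by
                  simpa using hm
                rw [hflag]
                simp
              · rw [List.length_set, hKzero, hdisp']
                simp
              · rw [List.length_set]; omega
              · rw [List.map_set]
                exact nodup_set hnd hm
              · intro j hj
                rw [hlen1]
                have hj2 : j < (q :: qs).length := by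
                  simpa [List.length_set] using hj
                simp only [List.getElem_set]
                by_cases hwj : w.toNat = j
                · simp only [if_pos hwj]
                  exact hTdef
                · simp only [if_neg hwj]
                  have hqj : ((q :: qs)[j]'hj2).1 ≠ s :=
                    fun hc => hm (hc ▸ List.mem_map_of_mem (List.getElem_mem hj2))
                  rw [hnext j hj2, hstepOcc _ hqj]

-- ===== VERDICT (by name: the statement is the Claim_ definition above) =====
theorem simulate_paging_spec : Claim_equal_simulate_paging := by
  intro refs nf alg _hdom hpre
  unfold Spec_simulate_paging simulate_paging simulate_paging_alt
  by_cases h1 : alg = "FIFO"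
  · subst h1
    rcases hpre.1 rfl with hnf | ⟨hnf, hrefs⟩
    · have hF := fifo_fold_eq nf (by omega) refs [] [] []
      simp at hF
      simp [hF]
    · subst hnf hrefs; rfl
  · by_cases h2 : alg = "LRU"
    · subst h2
      rcases hpre.2 rfl with hnf | hrefs
      · have hL := lru_fold_eq nf hnf refs [] (by simp) [] []
        simp only [List.map_nil] at hL
        have he : PySem.Dict.empty = (PySem.Dict.mk ([] : List (Int × Bool))) := rfl
        simp only [h1] at *
        simp [he, hL]
      · subst hrefs; simp [h1, scanOrd]
    · by_cases h3 : alg = "Optimal"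
      · subst h3
        have hO := opt_fold_eq refs nf [] refs rfl (PySem.List.pyRepeat [none] nf) [] [] []
          (by simp [PySem.List.pyRepeat_singleton]) (by simp) (by simp) (by intro j hj; simp at hj)
        simp only [List.length_nil, Nat.cast_zero, PySem.List.pyRepeat_singleton] at hO
        simp [h1, h2, hO]
      · simp [h1, h2, h3]
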